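-- pv_equiv track=rewrite | github.com/NotInWine/Machine-Learning | Naive Bayes/nbc.py | TextFeatures1
-- ===== SOURCE A (Python) =====
-- def TextFeatures1(train_data_list, test_data_list, feature_words):
-- 	def text_features(text, feature_words):
-- 		text_words = set(text)
-- 		features = [1 if word in text_words else 0 for word in feature_words] #出现在特征集中，则置1
-- 		return features
-- 	train_feature_list = [text_features(text, feature_words) for text in train_data_list]
-- 	test_feature_list = [text_features(text, feature_words) for text in test_data_list]
-- 	return train_feature_list, test_feature_list				#返回结果
-- ===== SOURCE B (Python) =====
-- def TextFeatures1(train_data_list, test_data_list, feature_words):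
--     # Inverted index: feature word -> list of its column positions (duplicates kept).
--     index = {}
--     for i, w in enumerate(feature_words):
--         index.setdefault(w, []).append(i)
--     n = len(feature_words)
--
--     def row(text):
--         features = [0] * n
--         for w in set(text):
--             for p in index.get(w, []):
--                 features[p] = 1
--         return features
--
--     train_feature_list = [row(text) for text in train_data_list]
--     test_feature_list = [row(text) for text in test_data_list]
--     return train_feature_list, test_feature_list
-- ===== Notes on version B (the rewrite author's own statement) =====
-- stated objective: alternative
-- what changed: B builds an inverted index from each feature word to the list of its column positions once, then fills a zero row per text by setting positions for the text's distinct words, instead of testing every feature word against set(text) per text.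
import Mathlib
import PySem

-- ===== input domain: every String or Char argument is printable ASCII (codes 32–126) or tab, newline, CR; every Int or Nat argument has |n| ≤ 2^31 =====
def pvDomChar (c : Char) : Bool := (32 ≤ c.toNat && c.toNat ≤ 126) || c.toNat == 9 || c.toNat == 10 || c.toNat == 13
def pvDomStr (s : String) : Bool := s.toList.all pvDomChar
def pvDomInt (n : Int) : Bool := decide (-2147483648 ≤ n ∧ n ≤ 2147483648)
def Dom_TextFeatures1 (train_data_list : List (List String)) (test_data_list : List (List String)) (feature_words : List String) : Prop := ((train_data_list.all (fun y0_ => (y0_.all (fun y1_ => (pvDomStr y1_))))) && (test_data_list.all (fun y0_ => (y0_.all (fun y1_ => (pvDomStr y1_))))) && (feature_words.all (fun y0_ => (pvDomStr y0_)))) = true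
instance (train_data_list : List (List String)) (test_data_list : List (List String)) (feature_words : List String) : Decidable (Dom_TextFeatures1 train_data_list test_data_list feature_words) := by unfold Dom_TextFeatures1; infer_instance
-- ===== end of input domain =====

-- B replaces the per-text scan of all feature words by an inverted index (word -> column
-- positions) built once, then fills each 0-row from the text's word set: alternative structure.


-- ===== PORT A =====
-- helper `text_features`: text_words = set(text); [1 if word in text_words else 0 for word in feature_words]
def pvA_textFeatures (text : List String) (feature_words : List String) : List Int :=
  let text_words : PySem.Set String := PySem.Set.ofList text
  feature_words.map (fun word => if PySem.Set.contains text_words word then (1 : Int) else 0)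

def TextFeatures1 (train_data_list : List (List String)) (test_data_list : List (List String)) (feature_words : List String) : List (List Int) × List (List Int) :=
  let train_feature_list := train_data_list.map (fun text => pvA_textFeatures text feature_words)
  let test_feature_list := test_data_list.map (fun text => pvA_textFeatures text feature_words)
  (train_feature_list, test_feature_list)

-- ===== PORT B =====
-- inverted index: for i, w in enumerate(feature_words): index.setdefault(w, []).append(i)
-- (positions are the nonnegative enumerate indices, kept as Nat)
def pvB_index (feature_words : List String) : PySem.Dict String (List Nat) :=
  feature_words.zipIdx.foldl (fun d p => d.modify p.1 [] (· ++ [p.2])) PySem.Dict.empty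

-- row: features = [0]*n; for w in set(text): for p in index.get(w, []): features[p] = 1
def pvB_row (index : PySem.Dict String (List Nat)) (n : Nat) (text : List String) : List Int :=
  (PySem.Set.ofList text).foldl
    (fun features w => (index.getD w []).foldl (fun fs p => fs.set p 1) features)
    (List.replicate n (0 : Int))

def TextFeatures1_alt (train_data_list : List (List String)) (test_data_list : List (List String)) (feature_words : List String) : List (List Int) × List (List Int) :=
  let index := pvB_index feature_words
  let n := feature_words.length
  let train_feature_list := train_data_list.map (fun text => pvB_row index n text)
  let test_feature_list := test_data_list.map (fun text => pvB_row index n text)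
  (train_feature_list, test_feature_list)

-- ===== PRECONDITION & SPEC =====
def Spec_TextFeatures1 (train_data_list : List (List String)) (test_data_list : List (List String)) (feature_words : List String) (out : List (List Int) × List (List Int)) : Prop := out = TextFeatures1_alt train_data_list test_data_list feature_words
instance (train_data_list : List (List String)) (test_data_list : List (List String)) (feature_words : List String) (out : List (List Int) × List (List Int)) : Decidable (Spec_TextFeatures1 train_data_list test_data_list feature_words out) := by unfold Spec_TextFeatures1; infer_instance

-- ===== CLAIM (what is proved, stated in full; the proofs are below) =====
def Claim_equal_TextFeatures1 : Prop := ∀ (train_data_list : List (List String)) (test_data_list : List (List String)) (feature_words : List String), Dom_TextFeatures1 train_data_list test_data_list feature_words → Spec_TextFeatures1 train_data_list test_data_list feature_words (TextFeatures1 train_data_list test_data_list feature_words)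

-- ===== LEMMAS AND PROOFS =====

-- The index maps w to exactly the positions i with feature_words[i]? = some w.
theorem pvB_index_getD (feature_words : List String) (w : String) (i : Nat) :
    i ∈ (pvB_index feature_words).getD w [] ↔ feature_words[i]? = some w := by
  unfold pvB_index
  rw [PySem.Dict.getD_foldl_modify_append]
  rw [show (PySem.Dict.empty : PySem.Dict String (List Nat)).getD w [] = [] from rfl]
  simp only [List.nil_append, List.mem_map, List.mem_filter]
  constructor
  · rintro ⟨⟨x, j⟩, ⟨hmem, heq⟩, rfl⟩
    simp only [beq_iff_eq] at heq
    subst heq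
    exact (List.mk_mem_zipIdx_iff_getElem?).mp hmem
  · intro h
    exact ⟨(w, i), ⟨(List.mk_mem_zipIdx_iff_getElem?).mpr h, by simp⟩, rfl⟩

-- Setting a batch of in-range positions to 1, read back pointwise.
theorem pv_foldl_set_getElem? (ps : List Nat) (arr : List Int) (i : Nat)
    (hv : ∀ p ∈ ps, p < arr.length) :
    (ps.foldl (fun fs p => fs.set p (1 : Int)) arr)[i]? =
      if i ∈ ps then some 1 else arr[i]? := by
  induction ps generalizing arr with
  | nil => simp
  | cons p ps ih =>
    simp only [List.foldl_cons]
    rw [ih (arr.set p 1) (by simpa using fun q hq => hv q (List.mem_cons_of_mem _ hq))]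
    by_cases hmem : i ∈ ps
    · simp [hmem, List.mem_cons]
    · by_cases hip : i = p
      · subst hip
        simp [hmem, hv i List.mem_cons_self]
      · simp [hmem, hip, List.getElem?_set_ne (fun h => hip h.symm)]

theorem pv_foldl_set_length (ps : List Nat) (arr : List Int) :
    (ps.foldl (fun fs p => fs.set p (1 : Int)) arr).length = arr.length := by
  induction ps generalizing arr with
  | nil => rfl
  | cons p ps ih => simp [List.foldl_cons, ih]

theorem pvB_row_fold_getElem? (fw : List String) (S : List String) (arr : List Int) (i : Nat)
    (hlen : arr.length = fw.length) :
    (S.foldl (fun features w => ((pvB_index fw).getD w []).foldl (fun fs p => fs.set p 1) features) arr)[i]? =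
      if S.any (fun w => decide (i ∈ (pvB_index fw).getD w [])) then some 1 else arr[i]? := by
  induction S generalizing arr with
  | nil => simp
  | cons w S ih =>
    simp only [List.foldl_cons, List.any_cons]
    have hv : ∀ p ∈ (pvB_index fw).getD w [], p < arr.length := by
      intro p hp
      have := (pvB_index_getD fw w p).mp hp
      have : p < fw.length := by
        by_contra h
        rw [List.getElem?_eq_none (by omega)] at this
        simp at this
      omega
    rw [ih _ (by rw [pv_foldl_set_length]; exact hlen)]
    by_cases hS : S.any (fun w => decide (i ∈ (pvB_index fw).getD w [])) = true
    · simp [hS]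
    · simp only [hS, Bool.or_false]
      rw [pv_foldl_set_getElem? _ _ _ hv]
      by_cases hi : i ∈ (pvB_index fw).getD w [] <;> simp [hi]

-- Each B row equals the corresponding A row.
theorem pv_row_eq (fw : List String) (text : List String) :
    pvB_row (pvB_index fw) fw.length text = pvA_textFeatures text fw := by
  apply List.ext_getElem?
  intro i
  unfold pvB_row pvA_textFeatures
  rw [pvB_row_fold_getElem? fw _ _ i (by simp)]
  by_cases hin : i < fw.length
  · have hA : (fw.map (fun word => if PySem.Set.contains (PySem.Set.ofList text) word then (1 : Int) else 0))[i]? =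
        some (if PySem.Set.contains (PySem.Set.ofList text) fw[i] then (1 : Int) else 0) := by
      simp [hin]
    rw [hA]
    by_cases hw : fw[i] ∈ text
    · have hany : ((PySem.Set.ofList text).any (fun w => decide (i ∈ (pvB_index fw).getD w []))) = true := by
        refine List.any_eq_true.mpr ⟨fw[i], ?_, ?_⟩
        · exact (PySem.Set.mem_ofList _ _).mpr hw
        · simp [pvB_index_getD, hin]
      have hc : PySem.Set.contains (PySem.Set.ofList text) fw[i] = true := by
        simp [PySem.Set.mem_ofList, hw]
      simp [hany, hw]
    · have hany : ((PySem.Set.ofList text).any (fun w => decide (i ∈ (pvB_index fw).getD w []))) = false := by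
        rw [List.any_eq_false]
        intro w hwS
        simp only [decide_eq_true_eq, pvB_index_getD]
        intro hgw
        have hfi : fw[i] = w := by
          rw [List.getElem?_eq_getElem hin] at hgw
          exact Option.some_inj.mp hgw
        exact hw (hfi ▸ (PySem.Set.mem_ofList _ _).mp hwS)
      have hc : PySem.Set.contains (PySem.Set.ofList text) fw[i] = false := by
        simp [PySem.Set.mem_ofList, hw]
      simp [hany, hw, hin]
  · have h0 : ((List.replicate fw.length (0 : Int)))[i]? = none := by
      rw [List.getElem?_eq_none]; simpa using hin
    have hany : ∀ w ∈ PySem.Set.ofList text, ¬ (i ∈ (pvB_index fw).getD w []) := by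
      intro w _ hgw
      have := (pvB_index_getD fw w i).mp hgw
      rw [List.getElem?_eq_none (by omega)] at this
      simp at this
    have : ((PySem.Set.ofList text).any (fun w => decide (i ∈ (pvB_index fw).getD w []))) = false := by
      rw [List.any_eq_false]; intro w hwS; simpa using hany w hwS
    simp [this, h0]
    omega

-- ===== VERDICT (by name: the statement is the Claim_ definition above) =====
theorem TextFeatures1_spec : Claim_equal_TextFeatures1 := by
  intro train test fw _
  unfold Spec_TextFeatures1 TextFeatures1 TextFeatures1_alt
  simp only [Prod.mk.injEq]
  exact ⟨List.map_congr_left (fun text _ => (pv_row_eq fw text).symm),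
         List.map_congr_left (fun text _ => (pv_row_eq fw text).symm)⟩
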